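-- pv_equiv track=rewrite | github.com/Chitrank-Dixit/coding-questions | amazon/min_main_memory.py | perform
-- ===== SOURCE A (Python) =====
-- def perform(processes, m):
--     if processes is None:
--         return 0
--     if m == 0:
--         return sum(processes)
--
--     l = 0
--     r = 0
--     n = len(processes)
--     max_sum = 0
--     coun = 0
--     while r < n:
--         if r - l + 1 > m:
--             coun -= processes[l]
--             l += 1
--         coun += processes[r]
--         max_sum = max(max_sum, coun)
--         r += 1
--     return sum(processes) - max_sum
-- ===== SOURCE B (Python) =====
-- def perform(processes, m):
--     if processes is None:
--         return 0
--     total = sum(processes)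
--     if m <= 0:
--         # a non-positive window size admits no window, so nothing can be kept in memory
--         return total
--     prefix = [0]
--     for x in processes:
--         prefix.append(prefix[-1] + x)
--     best = 0
--     for r in range(len(processes)):
--         best = max(best, prefix[r + 1] - prefix[max(0, r - m + 1)])
--     return total - best
-- ===== Notes on version B (the rewrite author's own statement) =====
-- stated objective: alternative
-- what changed: Replaces A's incremental sliding-window loop (moving left pointer, running window sum) by a prefix-sum array built once, with each window sum obtained as a difference of two prefix sums; nonpositive window sizes, where no window fits, return the total directly.
import Mathlib
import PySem

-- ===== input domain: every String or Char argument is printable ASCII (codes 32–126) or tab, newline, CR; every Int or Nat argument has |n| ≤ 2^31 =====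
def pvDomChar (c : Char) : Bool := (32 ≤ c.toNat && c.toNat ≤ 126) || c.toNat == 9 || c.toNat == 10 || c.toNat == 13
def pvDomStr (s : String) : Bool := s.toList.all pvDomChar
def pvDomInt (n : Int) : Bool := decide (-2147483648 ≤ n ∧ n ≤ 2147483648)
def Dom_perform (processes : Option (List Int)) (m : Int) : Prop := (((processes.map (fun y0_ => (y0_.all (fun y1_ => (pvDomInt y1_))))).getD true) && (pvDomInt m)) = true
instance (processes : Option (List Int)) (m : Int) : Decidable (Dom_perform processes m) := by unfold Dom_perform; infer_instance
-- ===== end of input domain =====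

-- B replaces the incremental sliding-window loop by a prefix-sum array, reading each
-- window sum off as a difference of two prefix sums (alternative decomposition, same O(n)).

-- ===== PORT A =====
def perform (processes : Option (List Int)) (m : Int) : Int :=
  match processes with
  | none => 0
  | some xs =>
    if m = 0 then xs.sum
    else
      let n := xs.length
      let st := (List.range n).foldl (fun (s : Int × Int × Int) (r : Nat) =>
        let l := s.1
        let coun := s.2.1
        let maxSum := s.2.2
        let p := if (r : Int) - l + 1 > m then (l + 1, coun - (PySem.List.pyGet? xs l).getD 0)
                 else (l, coun)
        let coun2 := p.2 + (PySem.List.pyGet? xs ((r : Nat) : Int)).getD 0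
        (p.1, coun2, max maxSum coun2)) (0, 0, 0)
      xs.sum - st.2.2

-- ===== PORT B =====
def perform_alt (processes : Option (List Int)) (m : Int) : Int :=
  match processes with
  | none => 0
  | some xs =>
    let total := xs.sum
    if m ≤ 0 then total
    else
      let P := xs.foldl (fun P x => P ++ [(PySem.List.pyGet? P (-1)).getD 0 + x]) [0]
      let best := (List.range xs.length).foldl (fun (best : Int) (r : Nat) =>
        max best ((PySem.List.pyGet? P ((r : Int) + 1)).getD 0
          - (PySem.List.pyGet? P (max 0 ((r : Int) - m + 1))).getD 0)) 0
      total - best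

-- ===== PRECONDITION & SPEC =====
def Spec_perform (processes : Option (List Int)) (m : Int) (out : Int) : Prop := out = perform_alt processes m
instance (processes : Option (List Int)) (m : Int) (out : Int) : Decidable (Spec_perform processes m out) := by unfold Spec_perform; infer_instance

-- ===== CLAIM (what is proved, stated in full; the proofs are below) =====
def Claim_equal_perform : Prop := ∀ (processes : Option (List Int)) (m : Int), Dom_perform processes m → Spec_perform processes m (perform processes m)

-- ===== LEMMAS AND PROOFS =====

/-- prefix sum of the first `j` elements (clamped). -/
def pvPre (xs : List Int) (j : Int) : Int := (xs.take j.toNat).sum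

/-- left endpoint of the window examined by A after `k` iterations. -/
def pvL (m k : Int) : Int := min k (max 0 (k - m))

/-- window sum A examines at step `r`. -/
def pvW (xs : List Int) (m : Int) (r : Nat) : Int :=
  pvPre xs ((r : Int) + 1) - pvPre xs (pvL m ((r : Int) + 1))

theorem pvPre_succ (xs : List Int) (j : Int) (h0 : 0 ≤ j) (h1 : j < xs.length) :
    pvPre xs (j + 1) = pvPre xs j + (PySem.List.pyGet? xs j).getD 0 := by
  have hnat : j.toNat < xs.length := by omega
  have hjt : (j + 1).toNat = j.toNat + 1 := by omega
  rw [pvPre, pvPre, hjt, PySem.List.pyGet?_eq_some_getElem xs h0 (by exact_mod_cast h1),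
      Option.getD_some, List.sum_take_succ _ _ hnat]

theorem pvScanl_get (xs : List Int) : ∀ (j : Nat) (c : Int), j ≤ xs.length →
    (List.scanl (· + ·) c xs)[j]? = some (c + pvPre xs j) := by
  induction xs with
  | nil =>
    intro j c h
    have hj : j = 0 := by simpa using h
    subst hj; simp [pvPre]
  | cons x t ih =>
    intro j c h
    cases j with
    | zero => simp [pvPre]
    | succ j =>
      rw [List.scanl_cons, List.getElem?_cons_succ, ih j (c + x) (by simpa using h)]
      have hpre : pvPre (x :: t) ((j + 1 : Nat) : Int) = x + pvPre t (j : Int) := by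
        simp [pvPre]
      rw [hpre]
      congr 1
      ring

theorem pvBuildP (xs : List Int) : ∀ (acc : List Int) (c : Int),
    xs.foldl (fun P x => P ++ [(PySem.List.pyGet? P (-1)).getD 0 + x]) (acc ++ [c])
      = acc ++ List.scanl (· + ·) c xs := by
  induction xs with
  | nil => intro acc c; simp
  | cons x t ih =>
    intro acc c
    simp only [List.foldl_cons, PySem.List.pyGet?_neg_one_append_singleton, Option.getD_some]
    have := ih (acc ++ [c]) (c + x)
    simp only [List.append_assoc] at this ⊢
    rw [this, List.scanl_cons]
    simp

theorem pvP_get (xs : List Int) (j : Int) (h0 : 0 ≤ j) (h1 : j ≤ xs.length) :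
    (PySem.List.pyGet? (xs.foldl (fun P x => P ++ [(PySem.List.pyGet? P (-1)).getD 0 + x]) [0]) j).getD 0
      = pvPre xs j := by
  have hb := pvBuildP xs [] 0
  simp only [List.nil_append] at hb
  rw [hb, PySem.List.pyGet?_of_nonneg _ h0,
      pvScanl_get xs j.toNat 0 (by omega)]
  simp [Int.toNat_of_nonneg h0]

theorem pvL_zero (m : Int) : pvL m 0 = 0 := by unfold pvL; omega

theorem pvL_bounds (m k : Int) (hk : 0 ≤ k) : 0 ≤ pvL m k ∧ pvL m k ≤ k := by
  unfold pvL; omega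

theorem pvA_loop (xs : List Int) (m : Int) : ∀ (k : Nat), k ≤ xs.length →
    (List.range k).foldl (fun (s : Int × Int × Int) (r : Nat) =>
        let l := s.1
        let coun := s.2.1
        let maxSum := s.2.2
        let p := if (r : Int) - l + 1 > m then (l + 1, coun - (PySem.List.pyGet? xs l).getD 0)
                 else (l, coun)
        let coun2 := p.2 + (PySem.List.pyGet? xs ((r : Nat) : Int)).getD 0
        (p.1, coun2, max maxSum coun2)) (0, 0, 0)
      = (pvL m (k : Int), pvPre xs (k : Int) - pvPre xs (pvL m (k : Int)),
         (List.range k).foldl (fun b r => max b (pvW xs m r)) 0) := by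
  intro k hk
  induction k with
  | zero => simp [pvL_zero, pvPre]
  | succ k ih =>
    have hk' : k ≤ xs.length := by omega
    have hkl : (k : Int) < xs.length := by exact_mod_cast hk
    rw [List.range_succ, List.foldl_append, List.foldl_append, ih hk']
    simp only [List.foldl_cons, List.foldl_nil]
    have hLb := pvL_bounds m (k : Int) (by omega)
    have e2 := pvPre_succ xs (k : Int) (by omega) hkl
    have hcast : ((k + 1 : Nat) : Int) = (k : Int) + 1 := by push_cast; ring
    rw [hcast]
    split_ifs with hc
    · have hL1 : pvL m ((k : Int) + 1) = pvL m (k : Int) + 1 := by unfold pvL at *; omega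
      have hLlt : pvL m (k : Int) < (xs.length : Int) := by omega
      have e1 := pvPre_succ xs (pvL m (k : Int)) hLb.1 hLlt
      rw [hL1]
      refine Prod.ext (by omega) (Prod.ext ?_ ?_)
      · show pvPre xs (k : Int) - pvPre xs (pvL m (k : Int)) -
            (PySem.List.pyGet? xs (pvL m (k : Int))).getD 0 +
            (PySem.List.pyGet? xs ((k : Nat) : Int)).getD 0
          = pvPre xs ((k : Int) + 1) - pvPre xs (pvL m (k : Int) + 1)
        omega
      · show max _ _ = max _ _
        congr 1
        rw [pvW, hL1]
        omega
    · have hL1 : pvL m ((k : Int) + 1) = pvL m (k : Int) := by unfold pvL at *; omega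
      rw [hL1]
      refine Prod.ext rfl (Prod.ext ?_ ?_)
      · show pvPre xs (k : Int) - pvPre xs (pvL m (k : Int)) +
            (PySem.List.pyGet? xs ((k : Nat) : Int)).getD 0
          = pvPre xs ((k : Int) + 1) - pvPre xs (pvL m (k : Int))
        omega
      · show max _ _ = max _ _
        congr 1
        rw [pvW, hL1]
        omega

theorem pvB_loop (xs : List Int) (m : Int) (hm : 0 < m) : ∀ (k : Nat), k ≤ xs.length →
    (List.range k).foldl (fun (best : Int) (r : Nat) =>
        max best ((PySem.List.pyGet? (xs.foldl (fun P x => P ++ [(PySem.List.pyGet? P (-1)).getD 0 + x]) [0]) ((r : Int) + 1)).getD 0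
          - (PySem.List.pyGet? (xs.foldl (fun P x => P ++ [(PySem.List.pyGet? P (-1)).getD 0 + x]) [0]) (max 0 ((r : Int) - m + 1))).getD 0)) 0
      = (List.range k).foldl (fun b r => max b (pvW xs m r)) 0 := by
  intro k hk
  induction k with
  | zero => simp
  | succ k ih =>
    have hk' : k ≤ xs.length := by omega
    rw [List.range_succ, List.foldl_append, List.foldl_append, ih hk']
    simp only [List.foldl_cons, List.foldl_nil]
    congr 1
    have hkl : (k : Int) + 1 ≤ (xs.length : Int) := by exact_mod_cast hk
    have hLb := pvL_bounds m ((k : Int) + 1) (by omega)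
    have hLeq : max 0 ((k : Int) - m + 1) = pvL m ((k : Int) + 1) := by
      unfold pvL; omega
    rw [hLeq, pvP_get xs ((k : Int) + 1) (by omega) hkl,
        pvP_get xs (pvL m ((k : Int) + 1)) hLb.1 (by omega), pvW]

theorem pvW_neg (xs : List Int) (m : Int) (hm : m < 0) (r : Nat) : pvW xs m r = 0 := by
  have : pvL m ((r : Int) + 1) = (r : Int) + 1 := by unfold pvL; omega
  rw [pvW, this]; omega

theorem pvMax_zero (xs : List Int) (m : Int) (hm : m < 0) (k : Nat) :
    (List.range k).foldl (fun b r => max b (pvW xs m r)) 0 = 0 := by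
  induction k with
  | zero => simp
  | succ k ih =>
    rw [List.range_succ, List.foldl_append, ih]
    simp [pvW_neg xs m hm]

-- ===== VERDICT (by name: the statement is the Claim_ definition above) =====
theorem perform_spec : Claim_equal_perform := by
  intro processes m _
  unfold Spec_perform
  cases processes with
  | none => rfl
  | some xs =>
    by_cases hm : m = 0
    · simp [perform, perform_alt, hm]
    · by_cases hneg : m < 0
      · simp only [perform, perform_alt, if_neg hm, if_pos (by omega : m ≤ 0)]
        rw [pvA_loop xs m xs.length le_rfl]
        simp only
        rw [pvMax_zero xs m hneg]
        omega
      · simp only [perform, perform_alt, if_neg hm, if_neg (by omega : ¬ m ≤ 0)]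
        rw [pvA_loop xs m xs.length le_rfl, pvB_loop xs m (by omega) xs.length le_rfl]
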